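-- pv_equiv track=rewrite | github.com/tiendm1991/python | DynamicPrograming/pathCountRecTopLeftToBottomRight.py | pathCountRecTopLeftToBottomRight
-- ===== SOURCE A (Python) =====
-- def pathCountRecTopLeftToBottomRight(arr, k):
--     r = len(arr)
--     c = len(arr[0])
--     dp = [[[0 for l in range(k+1)] for j in range(c+1)] for i in range(r+1)]
--     dp[1][1][arr[0][0]] = 1
--     for i in range(1, r+1):
--         for j in range(1, c+1):
--             element = arr[i - 1][j - 1]
--             for x in range(k+1):
--                 if x >= element:
--                     dp[i][j][x] += dp[i][j-1][x - element] + dp[i-1][j][x-element]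
--     return dp[r][c][k]
-- ===== SOURCE B (Python) =====
-- def pathCountRecTopLeftToBottomRight(arr, k):
--     r = len(arr)
--     c = len(arr[0])
--     memo = {}
--     def solve(i, j):
--         if (i, j) in memo:
--             return memo[(i, j)]
--         if i == 0 and j == 0:
--             v = [0] * (k + 1)
--             v[arr[0][0]] = 1
--         else:
--             e = arr[i][j]
--             left = solve(i, j - 1) if j > 0 else None
--             up = solve(i - 1, j) if i > 0 else None
--             v = [(left[s - e] if j > 0 and s - e >= 0 else 0)
--                  + (up[s - e] if i > 0 and s - e >= 0 else 0)
--                  for s in range(k + 1)]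
--         memo[(i, j)] = v
--         return v
--     return solve(r - 1, c - 1)[k]
-- ===== Notes on version B (the rewrite author's own statement) =====
-- stated objective: alternative
-- what changed: Replaces the bottom-up in-place fill of an (r+1)x(c+1)x(k+1) table with sentinel borders by a top-down memoized recursion solve(i,j) that builds, per cell, the vector of path counts for each sum 0..k from the left and upper cells' vectors, cached in a dict keyed by (i,j).
import Mathlib
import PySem

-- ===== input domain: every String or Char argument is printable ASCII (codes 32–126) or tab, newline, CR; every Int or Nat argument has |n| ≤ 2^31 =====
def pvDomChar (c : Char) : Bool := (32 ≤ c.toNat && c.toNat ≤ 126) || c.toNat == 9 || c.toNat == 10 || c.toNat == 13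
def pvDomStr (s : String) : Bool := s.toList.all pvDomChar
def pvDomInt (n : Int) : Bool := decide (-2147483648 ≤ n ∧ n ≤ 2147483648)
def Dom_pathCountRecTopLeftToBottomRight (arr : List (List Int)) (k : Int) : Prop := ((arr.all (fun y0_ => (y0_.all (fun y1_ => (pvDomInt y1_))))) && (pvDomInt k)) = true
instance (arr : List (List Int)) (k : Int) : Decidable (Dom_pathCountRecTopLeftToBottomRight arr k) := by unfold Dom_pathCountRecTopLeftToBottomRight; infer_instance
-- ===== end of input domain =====

-- B replaces A's bottom-up fill of a dense (r+1)×(c+1)×(k+1) table (in-place updates,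
-- sentinel row/column) by a top-down recursion solve(i,j,s) memoized in a dict; equal
-- return value on Pre_.

-- ===== PORT A =====
-- dp[i][j][x] reads/writes: every index is nonnegative and in range under Pre_,
-- where List.getD / List.set are exact renderings of Python indexing/assignment.
def pvGet3 (dp : List (List (List Int))) (i j x : Nat) : Int :=
  ((dp.getD i []).getD j []).getD x 0

def pvSet3 (dp : List (List (List Int))) (i j x : Nat) (v : Int) : List (List (List Int)) :=
  dp.set i ((dp.getD i []).set j (((dp.getD i []).getD j []).set x v))

def pathCountRecTopLeftToBottomRight (arr : List (List Int)) (k : Int) : Int :=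
  let r := arr.length
  let c := (arr.getD 0 []).length
  let dp0 : List (List (List Int)) :=
    (PySem.List.pyRange 0 ((r : Int) + 1) 1).map (fun _ =>
      (PySem.List.pyRange 0 ((c : Int) + 1) 1).map (fun _ =>
        (PySem.List.pyRange 0 (k + 1) 1).map (fun _ => (0 : Int))))
  let dp1 := pvSet3 dp0 1 1 ((arr.getD 0 []).getD 0 0).toNat 1
  let dpF :=
    (PySem.List.pyRange 1 ((r : Int) + 1) 1).foldl (fun dp i =>
      (PySem.List.pyRange 1 ((c : Int) + 1) 1).foldl (fun dp j =>
        let element := (arr.getD (i - 1).toNat []).getD ((j - 1).toNat) 0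
        (PySem.List.pyRange 0 (k + 1) 1).foldl (fun dp x =>
          if element ≤ x then
            pvSet3 dp i.toNat j.toNat x.toNat
              (pvGet3 dp i.toNat j.toNat x.toNat
                + pvGet3 dp i.toNat ((j - 1).toNat) ((x - element).toNat)
                + pvGet3 dp ((i - 1).toNat) j.toNat ((x - element).toNat))
          else dp) dp) dp) dp1
  pvGet3 dpF r c k.toNat

-- ===== PORT B =====
-- top-down memoized recursion per cell: solve(i, j) = the vector v with v[s] = number of
-- monotone paths from (0,0) to (i,j) summing to s (s = 0..k), cached in a dict keyed by (i, j).
-- ('if (i,j) in memo: return memo[(i,j)]' is rendered by the single get? match; i, j are Nat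
-- because under Pre_ the Python recursion only ever sees nonnegative i, j; v[arr[0][0]] is
-- PySem.List.pySetD, and left[s-e] / up[s-e] / solve(...)[k] are List.getD, exact under Pre_
-- where those indexes are in range.)
def pvSolveB (arr : List (List Int)) (k : Int) (i j : Nat)
    (memo : PySem.Dict (Nat × Nat) (List Int)) :
    List Int × PySem.Dict (Nat × Nat) (List Int) :=
  match memo.get? (i, j) with
  | some v => (v, memo)
  | none =>
    let pr : List Int × PySem.Dict (Nat × Nat) (List Int) :=
      if i = 0 ∧ j = 0 then
        (PySem.List.pySetD ((PySem.List.pyRange 0 (k + 1) 1).map (fun _ => (0 : Int)))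
          ((arr.getD 0 []).getD 0 0) 1, memo)
      else
        let e := (arr.getD i []).getD j 0
        let pl := if _h : 0 < j then
            (let q := pvSolveB arr k i (j - 1) memo; (some q.1, q.2))
          else ((none : Option (List Int)), memo)
        let pu := if _h : 0 < i then
            (let q := pvSolveB arr k (i - 1) j pl.2; (some q.1, q.2))
          else ((none : Option (List Int)), pl.2)
        ((PySem.List.pyRange 0 (k + 1) 1).map (fun s =>
            (if 0 < j ∧ 0 ≤ s - e then (pl.1.getD []).getD (s - e).toNat 0 else 0)
              + (if 0 < i ∧ 0 ≤ s - e then (pu.1.getD []).getD (s - e).toNat 0 else 0)), pu.2)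
    (pr.1, pr.2.insert (i, j) pr.1)
termination_by i + j
decreasing_by all_goals omega

def pathCountRecTopLeftToBottomRight_alt (arr : List (List Int)) (k : Int) : Int :=
  ((pvSolveB arr k (arr.length - 1) ((arr.getD 0 []).length - 1) PySem.Dict.empty).1).getD
    k.toNat 0

-- ===== PRECONDITION & SPEC =====
-- Pre_ is exactly A's non-crash set: A raises IndexError when arr is empty, its first row is
-- empty, k < 0 (dp's innermost lists are empty), arr[0][0] > k or arr[0][0] < 0 (initial write /
-- x-element out of range), some row is shorter than the first, or some element of the first-c
-- columns is negative (x - element exceeds k at x = k).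
def Pre_pathCountRecTopLeftToBottomRight (arr : List (List Int)) (k : Int) : Prop :=
  arr ≠ [] ∧ arr.getD 0 [] ≠ [] ∧ 0 ≤ k ∧ (arr.getD 0 []).getD 0 0 ≤ k ∧
  ∀ row ∈ arr, (arr.getD 0 []).length ≤ row.length ∧
    ∀ x ∈ row.take (arr.getD 0 []).length, 0 ≤ x
instance (arr : List (List Int)) (k : Int) : Decidable (Pre_pathCountRecTopLeftToBottomRight arr k) := by
  unfold Pre_pathCountRecTopLeftToBottomRight; infer_instance

def pvWitness_pathCountRecTopLeftToBottomRight : List (List Int) × Int := ([[1, 2], [3, 4]], 7)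

def Spec_pathCountRecTopLeftToBottomRight (arr : List (List Int)) (k : Int) (out : Int) : Prop := out = pathCountRecTopLeftToBottomRight_alt arr k
instance (arr : List (List Int)) (k : Int) (out : Int) : Decidable (Spec_pathCountRecTopLeftToBottomRight arr k out) := by unfold Spec_pathCountRecTopLeftToBottomRight; infer_instance

-- ===== CLAIM (what is proved, stated in full; the proofs are below) =====
def Claim_equal_pathCountRecTopLeftToBottomRight : Prop := ∀ (arr : List (List Int)) (k : Int), Dom_pathCountRecTopLeftToBottomRight arr k → Pre_pathCountRecTopLeftToBottomRight arr k → Spec_pathCountRecTopLeftToBottomRight arr k (pathCountRecTopLeftToBottomRight arr k)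

-- ===== LEMMAS AND PROOFS =====

-- the shared recurrence: number of monotone paths from (0,0) to (i,j) with value sum s
def pvCnt (arr : List (List Int)) (a00 : Int) (i j : Nat) (s : Int) : Int :=
  if s < 0 then 0
  else if i = 0 ∧ j = 0 then (if s = a00 then 1 else 0)
  else
    (if _h : 0 < i then pvCnt arr a00 (i - 1) j (s - (arr.getD i []).getD j 0) else 0)
      + (if _h : 0 < j then pvCnt arr a00 i (j - 1) (s - (arr.getD i []).getD j 0) else 0)
termination_by i + j
decreasing_by all_goals omega

theorem pvCnt_neg (arr : List (List Int)) (a00 : Int) (i j : Nat) (s : Int) (h : s < 0) :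
    pvCnt arr a00 i j s = 0 := by
  rw [pvCnt]; simp [h]

-- ---- A side: the table fill, restated with Nat indices ----
def pvE (arr : List (List Int)) (i j : Nat) : Int := (arr.getD i []).getD j 0

def pvStep (arr : List (List Int)) (i j : Nat)
    (dp : List (List (List Int))) (x : Int) : List (List (List Int)) :=
  if pvE arr (i - 1) (j - 1) ≤ x then
    pvSet3 dp i j x.toNat
      (pvGet3 dp i j x.toNat
        + pvGet3 dp i (j - 1) ((x - pvE arr (i - 1) (j - 1)).toNat)
        + pvGet3 dp (i - 1) j ((x - pvE arr (i - 1) (j - 1)).toNat))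
  else dp

def pvCell (arr : List (List Int)) (k : Int) (i j : Nat) (t : Int)
    (dp : List (List (List Int))) : List (List (List Int)) :=
  (PySem.List.pyRange t (k + 1) 1).foldl (pvStep arr i j) dp

def pvRow (arr : List (List Int)) (k : Int) (i : Nat) (jt : Int)
    (dp : List (List (List Int))) : List (List (List Int)) :=
  (PySem.List.pyRange jt (((arr.getD 0 []).length : Int) + 1) 1).foldl
    (fun dp jj => pvCell arr k i jj.toNat 0 dp) dp

def pvAll (arr : List (List Int)) (k : Int) (it : Int)
    (dp : List (List (List Int))) : List (List (List Int)) :=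
  (PySem.List.pyRange it ((arr.length : Int) + 1) 1).foldl
    (fun dp ii => pvRow arr k ii.toNat 1 dp) dp

theorem getD_set_split {α : Type} (l : List α) (i : Nat) (w : α) (i' : Nat) (d : α) :
    (l.set i w).getD i' d = if i' = i ∧ i < l.length then w else l.getD i' d := by
  rcases Decidable.em (i' = i ∧ i < l.length) with h | h
  · simp [List.getD, h.1, h.2]
  · rw [if_neg h]
    by_cases hii : i' = i
    · subst hii
      have : ¬ i' < l.length := by tauto
      simp [List.getD, this]
    · simp [List.getD, Ne.symm hii]

theorem pvGet3_pvSet3_ne (dp : List (List (List Int))) (i j x i' j' x' : Nat) (v : Int)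
    (h : ¬ (i' = i ∧ j' = j ∧ x' = x)) :
    pvGet3 (pvSet3 dp i j x v) i' j' x' = pvGet3 dp i' j' x' := by
  unfold pvGet3 pvSet3
  rw [getD_set_split]
  by_cases hii : i' = i ∧ i < dp.length
  · rw [if_pos hii]
    rw [getD_set_split]
    by_cases hjj : j' = j ∧ j < (dp.getD i []).length
    · rw [if_pos hjj, getD_set_split]
      have hxx : x' ≠ x := by
        intro hx; exact h ⟨hii.1, hjj.1, hx⟩
      rw [if_neg (by tauto), hii.1, hjj.1]
    · rw [if_neg hjj, hii.1]
  · rw [if_neg hii]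

theorem pvGet3_pvSet3_self (dp : List (List (List Int))) (i j x : Nat) (v : Int)
    (hi : i < dp.length) (hj : j < (dp.getD i []).length)
    (hx : x < ((dp.getD i []).getD j []).length) :
    pvGet3 (pvSet3 dp i j x v) i j x = v := by
  unfold pvGet3 pvSet3
  rw [getD_set_split, if_pos ⟨rfl, hi⟩, getD_set_split, if_pos ⟨rfl, hj⟩,
    getD_set_split, if_pos ⟨rfl, hx⟩]

def pvShape (arr : List (List Int)) (k : Int) (dp : List (List (List Int))) : Prop :=
  dp.length = arr.length + 1 ∧
  ∀ i, i ≤ arr.length →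
    (dp.getD i []).length = (arr.getD 0 []).length + 1 ∧
    ∀ j, j ≤ (arr.getD 0 []).length →
      ((dp.getD i []).getD j []).length = k.toNat + 1

theorem pvShape_pvSet3 (arr : List (List Int)) (k : Int) (dp : List (List (List Int)))
    (i j x : Nat) (v : Int) (h : pvShape arr k dp) : pvShape arr k (pvSet3 dp i j x v) := by
  obtain ⟨h1, h2⟩ := h
  refine ⟨by simpa [pvSet3] using h1, ?_⟩
  intro i' hi'
  have hrow : ∀ j', ((pvSet3 dp i j x v).getD i' []).getD j' [] =
      if i' = i ∧ i < dp.length ∧ j' = j ∧ j < (dp.getD i []).length then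
        ((dp.getD i []).getD j []).set x v
      else (dp.getD i' []).getD j' [] := by
    intro j'
    unfold pvSet3
    rw [getD_set_split]
    by_cases hii : i' = i ∧ i < dp.length
    · rw [if_pos hii, getD_set_split]
      by_cases hjj : j' = j ∧ j < (dp.getD i []).length
      · rw [if_pos hjj, if_pos ⟨hii.1, hii.2, hjj.1, hjj.2⟩]
      · rw [if_neg hjj, if_neg (by tauto), hii.1]
    · rw [if_neg hii, if_neg (by tauto)]
  constructor
  · have : ((pvSet3 dp i j x v).getD i' []).length = (dp.getD i' []).length := by
      unfold pvSet3
      rw [getD_set_split]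
      by_cases hii : i' = i ∧ i < dp.length
      · rw [if_pos hii, hii.1]; simp
      · rw [if_neg hii]
    rw [this]; exact (h2 i' hi').1
  · intro j' hj'
    rw [hrow j']
    by_cases hc : i' = i ∧ i < dp.length ∧ j' = j ∧ j < (dp.getD i []).length
    · rw [if_pos hc]
      have := (h2 i' hi').2 j' hj'
      rw [List.length_set, ← hc.1, ← hc.2.2.1]
      exact this
    · rw [if_neg hc]; exact (h2 i' hi').2 j' hj'

-- the invariant: cells processed in row-major order up to (i0, j0) hold the final counts,
-- the rest hold the initial table (1 at (1,1,arr[0][0]), 0 elsewhere)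
def pvG (arr : List (List Int)) (k : Int) (i0 j0 : Nat) (dp : List (List (List Int))) : Prop :=
  pvShape arr k dp ∧
  ∀ i j y, i ≤ arr.length → j ≤ (arr.getD 0 []).length → y ≤ k.toNat →
    pvGet3 dp i j y =
      if 1 ≤ i ∧ 1 ≤ j ∧ (i < i0 ∨ (i = i0 ∧ j ≤ j0)) then
        pvCnt arr (pvE arr 0 0) (i - 1) (j - 1) (y : Int)
      else if i = 1 ∧ j = 1 ∧ (y : Int) = pvE arr 0 0 then 1 else 0

theorem pv_elem_nonneg (arr : List (List Int)) (k : Int)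
    (hpre : Pre_pathCountRecTopLeftToBottomRight arr k) :
    ∀ i j : Nat, i < arr.length → j < (arr.getD 0 []).length → 0 ≤ pvE arr i j := by
  intro i j hi hj
  obtain ⟨hne, hne0, hk, hv, hrows⟩ := hpre
  have hmem : arr.getD i [] ∈ arr := by
    rw [List.getD_eq_getElem _ _ hi]
    exact List.getElem_mem _
  obtain ⟨hlen, hnn⟩ := hrows _ hmem
  apply hnn
  have hj' : j < (arr.getD i []).length := lt_of_lt_of_le hj hlen
  have hjt : j < ((arr.getD i []).take (arr.getD 0 []).length).length := by
    rw [List.length_take]; omega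
  have hx : ((arr.getD i []).take (arr.getD 0 []).length)[j]'hjt = (arr.getD i [])[j]'hj' := by
    simp [List.getElem_take]
  rw [pvE, List.getD_eq_getElem _ _ hj', ← hx]
  exact List.getElem_mem _

theorem pv_cell_lemma (arr : List (List Int)) (k : Int)
    (hpre : Pre_pathCountRecTopLeftToBottomRight arr k) (i j : Nat)
    (hi1 : 1 ≤ i) (hir : i ≤ arr.length) (hj1 : 1 ≤ j) (hjc : j ≤ (arr.getD 0 []).length) :
    ∀ (n : Nat) (t : Int), (k + 1 - t).toNat = n → 0 ≤ t →
    ∀ dp, pvShape arr k dp →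
    (∀ y : Nat, y ≤ k.toNat → pvGet3 dp i j y =
      if (y : Int) < t then pvCnt arr (pvE arr 0 0) (i - 1) (j - 1) (y : Int)
      else if i = 1 ∧ j = 1 ∧ (y : Int) = pvE arr 0 0 then 1 else 0) →
    (∀ y : Nat, y ≤ k.toNat → pvGet3 dp i (j - 1) y =
      if 2 ≤ j then pvCnt arr (pvE arr 0 0) (i - 1) (j - 2) (y : Int) else 0) →
    (∀ y : Nat, y ≤ k.toNat → pvGet3 dp (i - 1) j y =
      if 2 ≤ i then pvCnt arr (pvE arr 0 0) (i - 2) (j - 1) (y : Int) else 0) →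
    pvShape arr k (pvCell arr k i j t dp) ∧
    (∀ i' j' y', ¬ (i' = i ∧ j' = j) →
      pvGet3 (pvCell arr k i j t dp) i' j' y' = pvGet3 dp i' j' y') ∧
    (∀ y : Nat, y ≤ k.toNat →
      pvGet3 (pvCell arr k i j t dp) i j y = pvCnt arr (pvE arr 0 0) (i - 1) (j - 1) (y : Int)) := by
  have hk : 0 ≤ k := hpre.2.2.1
  have he0 : 0 ≤ pvE arr (i - 1) (j - 1) :=
    pv_elem_nonneg arr k hpre (i - 1) (j - 1) (by omega) (by omega)
  intro n
  induction n with
  | zero =>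
    intro t hn ht dp hShape hC hL hU
    have htk : k + 1 ≤ t := by omega
    have hnil : pvCell arr k i j t dp = dp := by
      unfold pvCell
      rw [PySem.List.pyRange_one_eq_nil htk]
      rfl
    rw [hnil]
    refine ⟨hShape, fun _ _ _ _ => rfl, ?_⟩
    intro y hy
    rw [hC y hy, if_pos (by omega : (y : Int) < t)]
  | succ n IH =>
    intro t hn ht dp hShape hC hL hU
    have htk : t < k + 1 := by omega
    have hir' : i < dp.length := by rw [hShape.1]; omega
    have hjc' : j < (dp.getD i []).length := by rw [((hShape.2) i hir).1]; omega
    have hS1 : pvShape arr k (pvStep arr i j dp t) := by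
      unfold pvStep
      split
      · exact pvShape_pvSet3 arr k dp _ _ _ _ hShape
      · exact hShape
    have hne1 : ∀ i' j' y', ¬ (i' = i ∧ j' = j) →
        pvGet3 (pvStep arr i j dp t) i' j' y' = pvGet3 dp i' j' y' := by
      intro i' j' y' h
      unfold pvStep
      split
      · exact pvGet3_pvSet3_ne dp i j t.toNat i' j' y' _ (by tauto)
      · rfl
    have hkey : ∀ y : Nat, y ≤ k.toNat → pvGet3 (pvStep arr i j dp t) i j y =
        if (y : Int) < t + 1 then pvCnt arr (pvE arr 0 0) (i - 1) (j - 1) (y : Int)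
        else if i = 1 ∧ j = 1 ∧ (y : Int) = pvE arr 0 0 then 1 else 0 := by
      intro y hy
      by_cases hyt : y = t.toNat
      · subst hyt
        have hcast : ((t.toNat : Int)) = t := Int.toNat_of_nonneg ht
        rw [if_pos (by omega : ((t.toNat : Int)) < t + 1)]
        have hinit : pvGet3 dp i j t.toNat =
            if i = 1 ∧ j = 1 ∧ ((t.toNat : Int)) = pvE arr 0 0 then 1 else 0 := by
          rw [hC t.toNat (by omega), if_neg (by omega : ¬ ((t.toNat : Int)) < t)]
        unfold pvStep
        by_cases he : pvE arr (i - 1) (j - 1) ≤ t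
        · rw [if_pos he]
          have hx' : t.toNat < ((dp.getD i []).getD j []).length := by
            rw [((hShape.2) i hir).2 j hjc]; omega
          rw [pvGet3_pvSet3_self dp i j t.toNat _ hir' hjc' hx']
          have hte : ((t - pvE arr (i - 1) (j - 1)).toNat : Int) = t - pvE arr (i - 1) (j - 1) := by
            omega
          have htekn : (t - pvE arr (i - 1) (j - 1)).toNat ≤ k.toNat := by omega
          rw [hinit, hL _ htekn, hU _ htekn, hte, hcast]
          by_cases hij1 : i = 1 ∧ j = 1
          · obtain ⟨rfl, rfl⟩ := hij1
            norm_num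
            conv_rhs => rw [pvCnt]
            rw [if_neg (by omega : ¬ t < 0)]
            norm_num
          · rw [if_neg (by tauto : ¬ (i = 1 ∧ j = 1 ∧ t = pvE arr 0 0))]
            conv_rhs => rw [pvCnt]
            rw [if_neg (by omega : ¬ t < 0), if_neg (by omega : ¬ (i - 1 = 0 ∧ j - 1 = 0))]
            have harg : (arr.getD (i - 1) []).getD (j - 1) 0 = pvE arr (i - 1) (j - 1) := rfl
            rw [harg]
            rw [show i - 1 - 1 = i - 2 from by omega, show j - 1 - 1 = j - 2 from by omega]
            by_cases h2i : 2 ≤ i <;> by_cases h2j : 2 ≤ j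
            · rw [dif_pos (by omega : 0 < i - 1), dif_pos (by omega : 0 < j - 1),
                if_pos h2i, if_pos h2j]
              ring
            · rw [dif_pos (by omega : 0 < i - 1), dif_neg (by omega : ¬ 0 < j - 1),
                if_pos h2i, if_neg h2j]
              ring
            · rw [dif_neg (by omega : ¬ 0 < i - 1), dif_pos (by omega : 0 < j - 1),
                if_neg h2i, if_pos h2j]
              ring
            · rw [dif_neg (by omega : ¬ 0 < i - 1), dif_neg (by omega : ¬ 0 < j - 1),
                if_neg h2i, if_neg h2j]
              ring
        · rw [if_neg he]
          rw [hinit, hcast]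
          by_cases hij1 : i = 1 ∧ j = 1
          · obtain ⟨rfl, rfl⟩ := hij1
            conv_rhs => rw [pvCnt]
            rw [if_neg (by omega : ¬ t < 0)]
            norm_num
          · rw [if_neg (by tauto : ¬ (i = 1 ∧ j = 1 ∧ t = pvE arr 0 0))]
            conv_rhs => rw [pvCnt]
            rw [if_neg (by omega : ¬ t < 0), if_neg (by omega : ¬ (i - 1 = 0 ∧ j - 1 = 0))]
            have harg : (arr.getD (i - 1) []).getD (j - 1) 0 = pvE arr (i - 1) (j - 1) := rfl
            rw [harg]
            have hneg : t - pvE arr (i - 1) (j - 1) < 0 := by omega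
            rw [pvCnt_neg _ _ _ _ _ hneg, pvCnt_neg _ _ _ _ _ hneg]
            simp
      · have huntouched : pvGet3 (pvStep arr i j dp t) i j y = pvGet3 dp i j y := by
          unfold pvStep
          split
          · exact pvGet3_pvSet3_ne dp i j t.toNat i j y _ (by tauto)
          · rfl
        rw [huntouched, hC y hy]
        exact if_congr (by omega) rfl rfl
    have hL1 : ∀ y : Nat, y ≤ k.toNat → pvGet3 (pvStep arr i j dp t) i (j - 1) y =
        if 2 ≤ j then pvCnt arr (pvE arr 0 0) (i - 1) (j - 2) (y : Int) else 0 := by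
      intro y hy
      rw [hne1 i (j - 1) y (by omega), hL y hy]
    have hU1 : ∀ y : Nat, y ≤ k.toNat → pvGet3 (pvStep arr i j dp t) (i - 1) j y =
        if 2 ≤ i then pvCnt arr (pvE arr 0 0) (i - 2) (j - 1) (y : Int) else 0 := by
      intro y hy
      rw [hne1 (i - 1) j y (by omega), hU y hy]
    obtain ⟨A1, A2, A3⟩ := IH (t + 1) (by omega) (by omega) (pvStep arr i j dp t) hS1 hkey hL1 hU1
    have hfold : pvCell arr k i j t dp = pvCell arr k i j (t + 1) (pvStep arr i j dp t) := by
      unfold pvCell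
      rw [PySem.List.pyRange_one_cons htk, List.foldl_cons]
    rw [hfold]
    exact ⟨A1, fun i' j' y' h => (A2 i' j' y' h).trans (hne1 i' j' y' h), A3⟩

theorem pv_row_lemma (arr : List (List Int)) (k : Int)
    (hpre : Pre_pathCountRecTopLeftToBottomRight arr k) (i : Nat)
    (hi1 : 1 ≤ i) (hir : i ≤ arr.length) :
    ∀ (n : Nat) (jt : Int), ((arr.getD 0 []).length + 1 - jt).toNat = n → 1 ≤ jt →
    jt ≤ ((arr.getD 0 []).length : Int) + 1 →
    ∀ dp, pvG arr k i ((jt - 1).toNat) dp →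
    pvG arr k i (arr.getD 0 []).length (pvRow arr k i jt dp) := by
  intro n
  induction n with
  | zero =>
    intro jt hn h1 h2 dp hG
    have hnil : pvRow arr k i jt dp = dp := by
      unfold pvRow
      rw [PySem.List.pyRange_one_eq_nil (by omega)]
      rfl
    rw [hnil]
    have heq : (jt - 1).toNat = (arr.getD 0 []).length := by omega
    rwa [heq] at hG
  | succ n IH =>
    intro jt hn h1 h2 dp hG
    have hlt : jt < ((arr.getD 0 []).length : Int) + 1 := by omega
    have hsplit : pvRow arr k i jt dp = pvRow arr k i (jt + 1) (pvCell arr k i jt.toNat 0 dp) := by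
      unfold pvRow
      rw [PySem.List.pyRange_one_cons hlt, List.foldl_cons]
    obtain ⟨hS, hCells⟩ := hG
    have hv0 : 0 ≤ pvE arr 0 0 :=
      pv_elem_nonneg arr k hpre 0 0 (by omega) (by omega)
    obtain ⟨B1, B2, B3⟩ := pv_cell_lemma arr k hpre i jt.toNat hi1 hir (by omega) (by omega)
      (k + 1 - 0).toNat 0 rfl le_rfl dp hS
      (by
        intro y hy
        rw [hCells i jt.toNat y hir (by omega) hy,
          if_neg (by omega : ¬ (1 ≤ i ∧ 1 ≤ jt.toNat ∧ (i < i ∨ (i = i ∧ jt.toNat ≤ (jt - 1).toNat)))),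
          if_neg (by omega : ¬ ((y : Int) < 0))])
      (by
        intro y hy
        rw [hCells i (jt.toNat - 1) y hir (by omega) hy]
        by_cases h2j : 2 ≤ jt.toNat
        · rw [if_pos (by omega), if_pos h2j, show jt.toNat - 1 - 1 = jt.toNat - 2 from by omega]
        · rw [if_neg (by omega), if_neg h2j,
            if_neg (by rintro ⟨-, hx, -⟩; omega)])
      (by
        intro y hy
        rw [hCells (i - 1) jt.toNat y (by omega) (by omega) hy]
        by_cases h2i : 2 ≤ i
        · rw [if_pos (by omega), if_pos h2i, show i - 1 - 1 = i - 2 from by omega]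
        · rw [if_neg (by omega), if_neg h2i,
            if_neg (by rintro ⟨hx, -, -⟩; omega)])
    have hG' : pvG arr k i jt.toNat (pvCell arr k i jt.toNat 0 dp) := by
      refine ⟨B1, ?_⟩
      intro i' j' y hi' hj' hy
      by_cases hcur : i' = i ∧ j' = jt.toNat
      · obtain ⟨rfl, rfl⟩ := hcur
        rw [B3 y hy, if_pos (by omega)]
      · rw [B2 i' j' y hcur, hCells i' j' y hi' hj' hy]
        exact if_congr (by omega) rfl rfl
    rw [hsplit]
    have heq : ((jt + 1) - 1).toNat = jt.toNat := by omega
    exact IH (jt + 1) (by omega) (by omega) (by omega) _ (heq ▸ hG')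

theorem pvG_row_shift (arr : List (List Int)) (k : Int) (i0 : Nat)
    (dp : List (List (List Int))) (h : pvG arr k i0 (arr.getD 0 []).length dp) :
    pvG arr k (i0 + 1) 0 dp := by
  obtain ⟨hS, hG⟩ := h
  refine ⟨hS, ?_⟩
  intro i j y hi hj hy
  rw [hG i j y hi hj hy]
  exact if_congr (by omega) rfl rfl

theorem pv_all_lemma (arr : List (List Int)) (k : Int)
    (hpre : Pre_pathCountRecTopLeftToBottomRight arr k) :
    ∀ (n : Nat) (it : Int), (arr.length + 1 - it).toNat = n → 1 ≤ it →
    it ≤ (arr.length : Int) + 1 →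
    ∀ dp, pvG arr k ((it - 1).toNat) (arr.getD 0 []).length dp →
    pvG arr k arr.length (arr.getD 0 []).length (pvAll arr k it dp) := by
  intro n
  induction n with
  | zero =>
    intro it hn h1 h2 dp hG
    have hnil : pvAll arr k it dp = dp := by
      unfold pvAll
      rw [PySem.List.pyRange_one_eq_nil (by omega)]
      rfl
    rw [hnil]
    have heq : (it - 1).toNat = arr.length := by omega
    rwa [heq] at hG
  | succ n IH =>
    intro it hn h1 h2 dp hG
    have hlt : it < (arr.length : Int) + 1 := by omega
    have hsplit : pvAll arr k it dp = pvAll arr k (it + 1) (pvRow arr k it.toNat 1 dp) := by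
      unfold pvAll
      rw [PySem.List.pyRange_one_cons hlt, List.foldl_cons]
    have heq1 : (it - 1).toNat + 1 = it.toNat := by omega
    have h0 : pvG arr k it.toNat 0 dp := heq1 ▸ pvG_row_shift arr k ((it - 1).toNat) dp hG
    have hrow : pvG arr k it.toNat (arr.getD 0 []).length (pvRow arr k it.toNat 1 dp) := by
      apply pv_row_lemma arr k hpre it.toNat (by omega) (by omega)
        (((arr.getD 0 []).length : Int) + 1 - 1).toNat 1 rfl le_rfl (by omega)
      rwa [show ((1 : Int) - 1).toNat = 0 from rfl]
    rw [hsplit]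
    have heq : ((it + 1) - 1).toNat = it.toNat := by omega
    exact IH (it + 1) (by omega) (by omega) (by omega) _ (heq ▸ hrow)

def pvDp0 (arr : List (List Int)) (k : Int) : List (List (List Int)) :=
  (PySem.List.pyRange 0 ((arr.length : Int) + 1) 1).map (fun _ =>
    (PySem.List.pyRange 0 (((arr.getD 0 []).length : Int) + 1) 1).map (fun _ =>
      (PySem.List.pyRange 0 (k + 1) 1).map (fun _ => (0 : Int))))

theorem pv_map_const_nat {α : Type} (n : Nat) (b : α) :
    (PySem.List.pyRange 0 ((n : Int) + 1) 1).map (fun _ => b) = List.replicate (n + 1) b := by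
  rw [List.map_const', PySem.List.length_pyRange_one]
  congr 1

theorem pv_map_const_int {α : Type} (k : Int) (hk : 0 ≤ k) (b : α) :
    (PySem.List.pyRange 0 (k + 1) 1).map (fun _ => b) = List.replicate (k.toNat + 1) b := by
  rw [List.map_const', PySem.List.length_pyRange_one]
  congr 1
  omega

theorem pv_getD_replicate {α : Type} (n i : Nat) (a d : α) :
    (List.replicate n a).getD i d = if i < n then a else d := by
  rw [List.getD, List.getElem?_replicate]
  split_ifs <;> simp_all

theorem pvDp0_eq (arr : List (List Int)) (k : Int) (hk : 0 ≤ k) :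
    pvDp0 arr k = List.replicate (arr.length + 1)
      (List.replicate ((arr.getD 0 []).length + 1)
        (List.replicate (k.toNat + 1) (0 : Int))) := by
  unfold pvDp0
  rw [pv_map_const_int k hk, pv_map_const_nat, pv_map_const_nat]

theorem pv_get3_dp0 (arr : List (List Int)) (k : Int) (hk : 0 ≤ k) (i j y : Nat) :
    pvGet3 (pvDp0 arr k) i j y = 0 := by
  rw [pvDp0_eq arr k hk]
  unfold pvGet3
  rw [pv_getD_replicate]
  split_ifs with h1
  · rw [pv_getD_replicate]
    split_ifs with h2
    · rw [pv_getD_replicate]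
      split_ifs <;> rfl
    · rfl
  · rfl

theorem pv_shape_dp0 (arr : List (List Int)) (k : Int) (hk : 0 ≤ k) :
    pvShape arr k (pvDp0 arr k) := by
  rw [pvDp0_eq arr k hk]
  refine ⟨by simp, ?_⟩
  intro i hi
  rw [pv_getD_replicate, if_pos (by omega)]
  refine ⟨by simp, ?_⟩
  intro j hj
  rw [pv_getD_replicate, if_pos (by omega)]
  simp

-- ---- B side: the memoized per-cell vectors hold pvCnt ----
theorem pv_getD_map_pyRange_int (k : Int) (hk : 0 ≤ k) (f : Int → Int) (x : Nat)
    (hx : x ≤ k.toNat) :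
    ((PySem.List.pyRange 0 (k + 1) 1).map f).getD x 0 = f (x : Int) := by
  rw [List.getD, PySem.List.pyRange_one, List.map_map, List.getElem?_map,
    List.getElem?_range (by omega : x < (k + 1 - 0).toNat)]
  simp

-- the vector at cell (i, j) is correct: right length, entry s = pvCnt arr arr[0][0] i j s
def pvGoodVec (arr : List (List Int)) (k : Int) (i j : Nat) (v : List Int) : Prop :=
  v.length = k.toNat + 1 ∧
  ∀ s : Nat, s ≤ k.toNat → v.getD s 0 = pvCnt arr ((arr.getD 0 []).getD 0 0) i j (s : Int)

-- the memo invariant: every cached vector is the correct one for its cell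
def pvMemoOK (arr : List (List Int)) (k : Int)
    (memo : PySem.Dict (Nat × Nat) (List Int)) : Prop :=
  ∀ (i j : Nat) (v : List Int), memo.get? (i, j) = some v → pvGoodVec arr k i j v

theorem pvMemoOK_insert (arr : List (List Int)) (k : Int)
    (memo : PySem.Dict (Nat × Nat) (List Int)) (i j : Nat) (v : List Int)
    (h : pvMemoOK arr k memo) (hv : pvGoodVec arr k i j v) :
    pvMemoOK arr k (memo.insert (i, j) v) := by
  intro i' j' v' hv'
  rw [PySem.Dict.get?_insert] at hv'
  by_cases hkey : ((i', j') : Nat × Nat) = (i, j)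
  · rw [if_pos hkey] at hv'
    cases hv'
    obtain ⟨h1, h2⟩ := Prod.mk.injEq .. ▸ hkey
    subst h1; subst h2
    exact hv
  · rw [if_neg hkey] at hv'
    exact h i' j' v' hv'

theorem pv_base_good (arr : List (List Int)) (k : Int)
    (hpre : Pre_pathCountRecTopLeftToBottomRight arr k) :
    pvGoodVec arr k 0 0
      (PySem.List.pySetD ((PySem.List.pyRange 0 (k + 1) 1).map (fun _ => (0 : Int)))
        ((arr.getD 0 []).getD 0 0) 1) := by
  have hk : 0 ≤ k := hpre.2.2.1
  have hvk : (arr.getD 0 []).getD 0 0 ≤ k := hpre.2.2.2.1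
  have hv0 : 0 ≤ (arr.getD 0 []).getD 0 0 :=
    pv_elem_nonneg arr k hpre 0 0 (List.length_pos_of_ne_nil hpre.1)
      (List.length_pos_of_ne_nil hpre.2.1)
  rw [PySem.List.pySetD_of_nonneg _ _ hv0, pv_map_const_int k hk]
  constructor
  · rw [List.length_set, List.length_replicate]
  · intro s hs
    rw [getD_set_split, pv_getD_replicate, List.length_replicate]
    conv_rhs => rw [pvCnt]
    rw [if_neg (by omega : ¬ ((s : Int)) < 0),
      if_pos (⟨rfl, rfl⟩ : (0 : Nat) = 0 ∧ (0 : Nat) = 0)]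
    split_ifs <;> omega

theorem pvSolveB_correct (arr : List (List Int)) (k : Int)
    (hpre : Pre_pathCountRecTopLeftToBottomRight arr k) :
    ∀ (n : Nat) (i j : Nat) (memo : PySem.Dict (Nat × Nat) (List Int)),
    i + j ≤ n → i < arr.length → j < (arr.getD 0 []).length → pvMemoOK arr k memo →
    pvGoodVec arr k i j (pvSolveB arr k i j memo).1 ∧
    pvMemoOK arr k (pvSolveB arr k i j memo).2 := by
  have hk : 0 ≤ k := hpre.2.2.1
  intro n
  induction n with
  | zero =>
    intro i j memo hn hi hj hok
    have h0 : i = 0 := by omega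
    have h1 : j = 0 := by omega
    subst h0; subst h1
    rw [pvSolveB]
    rcases hhit : memo.get? ((0 : Nat), (0 : Nat)) with - | v
    · dsimp only
      rw [if_pos ⟨rfl, rfl⟩]
      have hb := pv_base_good arr k hpre
      exact ⟨hb, pvMemoOK_insert arr k memo 0 0 _ hok hb⟩
    · exact ⟨hok 0 0 v hhit, hok⟩
  | succ n IH =>
    intro i j memo hn hi hj hok
    rw [pvSolveB]
    rcases hhit : memo.get? (i, j) with - | v
    · dsimp only
      by_cases hbase : i = 0 ∧ j = 0
      · rw [if_pos hbase]
        obtain ⟨rfl, rfl⟩ := hbase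
        have hb := pv_base_good arr k hpre
        exact ⟨hb, pvMemoOK_insert arr k memo 0 0 _ hok hb⟩
      · rw [if_neg hbase]
        have he0 : 0 ≤ (arr.getD i []).getD j 0 := pv_elem_nonneg arr k hpre i j hi hj
        have hrec : ∀ (lo uo : Option (List Int)) m1 m2,
            (if _h : 0 < j then
              (let q := pvSolveB arr k i (j - 1) memo; (some q.1, q.2))
             else ((none : Option (List Int)), memo)) = (lo, m1) →
            (if _h : 0 < i then
              (let q := pvSolveB arr k (i - 1) j m1; (some q.1, q.2))
             else ((none : Option (List Int)), m1)) = (uo, m2) →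
            pvGoodVec arr k i j
              ((PySem.List.pyRange 0 (k + 1) 1).map (fun s =>
                (if 0 < j ∧ 0 ≤ s - (arr.getD i []).getD j 0 then
                  (lo.getD []).getD (s - (arr.getD i []).getD j 0).toNat 0 else 0)
                  + (if 0 < i ∧ 0 ≤ s - (arr.getD i []).getD j 0 then
                      (uo.getD []).getD (s - (arr.getD i []).getD j 0).toNat 0 else 0))) ∧
            pvMemoOK arr k m2 := by
          intro lo uo m1 m2 h1 h2
          have step1 : (0 < j → ∃ q, lo = some q ∧ pvGoodVec arr k i (j - 1) q) ∧
              pvMemoOK arr k m1 := by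
            by_cases hj0 : 0 < j
            · rw [dif_pos hj0] at h1
              obtain ⟨e1, e2⟩ := IH i (j - 1) memo (by omega) hi (by omega) hok
              cases h1
              exact ⟨fun _ => ⟨_, rfl, e1⟩, e2⟩
            · rw [dif_neg hj0] at h1
              cases h1
              exact ⟨fun h => absurd h hj0, hok⟩
          have step2 : (0 < i → ∃ q, uo = some q ∧ pvGoodVec arr k (i - 1) j q) ∧
              pvMemoOK arr k m2 := by
            by_cases hi0 : 0 < i
            · rw [dif_pos hi0] at h2
              obtain ⟨e1, e2⟩ := IH (i - 1) j m1 (by omega) (by omega) hj step1.2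
              cases h2
              exact ⟨fun _ => ⟨_, rfl, e1⟩, e2⟩
            · rw [dif_neg hi0] at h2
              cases h2
              exact ⟨fun h => absurd h hi0, step1.2⟩
          refine ⟨⟨?_, ?_⟩, step2.2⟩
          · rw [List.length_map, PySem.List.length_pyRange_one]
            omega
          · intro s hs
            rw [pv_getD_map_pyRange_int k hk _ s hs]
            conv_rhs => rw [pvCnt]
            rw [if_neg (by omega : ¬ ((s : Int)) < 0), if_neg hbase]
            by_cases hse : 0 ≤ (s : Int) - (arr.getD i []).getD j 0
            · have hsek : ((s : Int) - (arr.getD i []).getD j 0).toNat ≤ k.toNat := by omega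
              have hcast : ((((s : Int) - (arr.getD i []).getD j 0).toNat : Int)) =
                  (s : Int) - (arr.getD i []).getD j 0 := by omega
              by_cases hi0 : 0 < i <;> by_cases hj0 : 0 < j
              · obtain ⟨ql, hql, hgl⟩ := step1.1 hj0
                obtain ⟨qu, hqu, hgu⟩ := step2.1 hi0
                rw [if_pos ⟨hj0, hse⟩, if_pos ⟨hi0, hse⟩, dif_pos hi0, dif_pos hj0,
                  hql, hqu]
                simp only [Option.getD_some]
                rw [hgl.2 _ hsek, hgu.2 _ hsek, hcast]
                ring
              · obtain ⟨qu, hqu, hgu⟩ := step2.1 hi0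
                rw [if_neg (by tauto), if_pos ⟨hi0, hse⟩, dif_pos hi0, dif_neg hj0, hqu]
                simp only [Option.getD_some]
                rw [hgu.2 _ hsek, hcast]
                ring
              · obtain ⟨ql, hql, hgl⟩ := step1.1 hj0
                rw [if_pos ⟨hj0, hse⟩, if_neg (by tauto), dif_neg hi0, dif_pos hj0, hql]
                simp only [Option.getD_some]
                rw [hgl.2 _ hsek, hcast]
                ring
              · omega
            · have hneg : (s : Int) - (arr.getD i []).getD j 0 < 0 := by omega
              rw [if_neg (by tauto), if_neg (by tauto)]
              rw [pvCnt_neg _ _ _ _ _ hneg, pvCnt_neg _ _ _ _ _ hneg]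
              simp
        obtain ⟨hv, hm⟩ := hrec _ _ _ _ (Prod.mk.eta ..).symm (Prod.mk.eta ..).symm
        exact ⟨hv, pvMemoOK_insert arr k _ i j _ hm hv⟩
    · exact ⟨hok i j v hhit, hok⟩

-- ===== VERDICT (by name: the statement is the Claim_ definition above) =====
theorem pathCountRecTopLeftToBottomRight_spec : Claim_equal_pathCountRecTopLeftToBottomRight := by
  intro arr k hdom hpre
  unfold Spec_pathCountRecTopLeftToBottomRight
  have hk : 0 ≤ k := hpre.2.2.1
  have hr1 : 0 < arr.length := List.length_pos_of_ne_nil hpre.1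
  have hc1 : 0 < (arr.getD 0 []).length := List.length_pos_of_ne_nil hpre.2.1
  have hvk : pvE arr 0 0 ≤ k := hpre.2.2.2.1
  have hee : pvE arr 0 0 = (arr.getD 0 []).getD 0 0 := rfl
  have hshape0 : pvShape arr k (pvDp0 arr k) := pv_shape_dp0 arr k hk
  have hlen0 : (pvDp0 arr k).length = arr.length + 1 := hshape0.1
  -- the port A computation, rewritten as the Nat-indexed folds pvAll/pvRow/pvCell
  have hA : pathCountRecTopLeftToBottomRight arr k =
      pvGet3 (pvAll arr k 1 (pvSet3 (pvDp0 arr k) 1 1 ((arr.getD 0 []).getD 0 0).toNat 1))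
        arr.length (arr.getD 0 []).length k.toNat := by
    unfold pathCountRecTopLeftToBottomRight pvAll
    dsimp only
    congr 1
    apply PySem.List.foldl_congr_mem
    intro acc ii hmem
    have hii : 1 ≤ ii := (PySem.List.mem_pyRange_one.mp hmem).1
    unfold pvRow
    apply PySem.List.foldl_congr_mem
    intro acc2 jj hmem2
    have hjj : 1 ≤ jj := (PySem.List.mem_pyRange_one.mp hmem2).1
    unfold pvCell
    apply PySem.List.foldl_congr_mem
    intro acc3 x _
    unfold pvStep
    rw [show (ii - 1).toNat = ii.toNat - 1 from by omega,
      show (jj - 1).toNat = jj.toNat - 1 from by omega]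
    rfl
  -- the initial table satisfies the invariant with nothing processed
  have hrow0 := hshape0.2 1 (by omega)
  have hG1 : pvG arr k 0 (arr.getD 0 []).length
      (pvSet3 (pvDp0 arr k) 1 1 ((arr.getD 0 []).getD 0 0).toNat 1) := by
    refine ⟨pvShape_pvSet3 arr k _ 1 1 _ 1 hshape0, ?_⟩
    intro i j y hi hj hy
    rw [if_neg (by omega :
      ¬ (1 ≤ i ∧ 1 ≤ j ∧ (i < 0 ∨ (i = 0 ∧ j ≤ (arr.getD 0 []).length))))]
    have hv0 : 0 ≤ pvE arr 0 0 := pv_elem_nonneg arr k hpre 0 0 (by omega) (by omega)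
    by_cases hcur : i = 1 ∧ j = 1 ∧ y = ((arr.getD 0 []).getD 0 0).toNat
    · obtain ⟨rfl, rfl, rfl⟩ := hcur
      rw [pvGet3_pvSet3_self _ _ _ _ _ (by omega) (by rw [hrow0.1]; omega)
        (by rw [hrow0.2 1 (by omega)]; omega)]
      rw [if_pos ⟨rfl, rfl, by omega⟩]
    · rw [pvGet3_pvSet3_ne _ _ _ _ _ _ _ _ hcur, pv_get3_dp0 arr k hk]
      rw [if_neg (by rintro ⟨rfl, rfl, h3⟩; exact hcur ⟨rfl, rfl, by omega⟩)]
  have hGF := pv_all_lemma arr k hpre ((arr.length : Int) + 1 - 1).toNat 1 rfl le_rfl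
    (by omega) _ (by rwa [show ((1 : Int) - 1).toNat = 0 from rfl])
  have hfinal := hGF.2 arr.length (arr.getD 0 []).length k.toNat le_rfl le_rfl le_rfl
  rw [if_pos (by omega)] at hfinal
  rw [hA, hfinal, Int.toNat_of_nonneg hk]
  -- port B computes the same recurrence top-down through per-cell memoized vectors
  unfold pathCountRecTopLeftToBottomRight_alt
  have hempty : pvMemoOK arr k PySem.Dict.empty := by
    intro i j v hv
    rw [PySem.Dict.get?_empty] at hv
    cases hv
  obtain ⟨⟨-, hgood⟩, -⟩ := pvSolveB_correct arr k hpre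
    (arr.length - 1 + ((arr.getD 0 []).length - 1)) (arr.length - 1)
    ((arr.getD 0 []).length - 1) PySem.Dict.empty le_rfl (by omega) (by omega) hempty
  rw [hgood k.toNat le_rfl, Int.toNat_of_nonneg hk, hee]
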